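-- pv_equiv track=rewrite | github.com/LaXHeXLuX/YksindaKoodis | 1.py | getPrice
-- ===== SOURCE A (Python) =====
-- def getPrice(line, prices):
--     priceIndexes = {}
--     for product in prices:
--         priceIndexes[product] = 0
--
--     sum = 0
--
--     for char in line:
--         for product in prices:
--             if char == product[priceIndexes[product]]:
--                 priceIndexes[product] += 1
--                 if priceIndexes[product] == len(product):
--                     sum += prices[product]
--                     priceIndexes[product] = 0
--
--     return sum
-- ===== SOURCE B (Python) =====
-- def getPrice(line, prices):
--     # Bucket each product's greedy automaton under the character it is waiting
--     # for; per character of the line only the matching bucket is touched.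
--     buckets = {}
--     for product, price in prices.items():
--         buckets.setdefault(product[0], []).append((product, price, 0))
--     total = 0
--     for ch in line:
--         for product, price, i in buckets.pop(ch, []):
--             i += 1
--             if i == len(product):
--                 total += price
--                 i = 0
--             buckets.setdefault(product[i], []).append((product, price, i))
--     return total
-- ===== Notes on version B (the rewrite author's own statement) =====
-- stated objective: faster
-- what changed: Instead of A's nested loop testing every product's automaton against every character, B keeps a dict that buckets each product's automaton under the single character it is currently waiting for; each character of the line pops and advances only the matching bucket, so non-matching products are never touched.
-- outside the precondition, e.g. on getPrice('', {'': 5}): A returns 0, B raises IndexError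
import Mathlib
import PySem

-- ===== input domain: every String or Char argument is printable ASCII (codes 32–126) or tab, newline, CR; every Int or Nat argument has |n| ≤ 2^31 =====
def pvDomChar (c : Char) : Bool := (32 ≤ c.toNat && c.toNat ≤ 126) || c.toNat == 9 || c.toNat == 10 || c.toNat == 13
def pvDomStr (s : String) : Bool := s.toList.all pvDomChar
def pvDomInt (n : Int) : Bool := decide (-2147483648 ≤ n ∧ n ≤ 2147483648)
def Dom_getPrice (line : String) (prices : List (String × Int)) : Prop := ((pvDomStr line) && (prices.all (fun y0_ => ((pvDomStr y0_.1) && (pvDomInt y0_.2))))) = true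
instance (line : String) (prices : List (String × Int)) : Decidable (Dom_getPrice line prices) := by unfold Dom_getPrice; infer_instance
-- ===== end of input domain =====

-- B replaces A's scan of every product for every character by a dict bucketing each
-- product's automaton under the character it currently waits for: each character of the
-- line pops and advances only its own bucket (asymptotically fewer automaton probes).

-- ===== PORT A =====
-- loop body of A's inner 'for product in prices' (prices iterates the dict's keys)
def aInner (pd : PySem.Dict String Int) (char : Char)
    (st : PySem.Dict String Int × Int) (product : String) :
    PySem.Dict String Int × Int :=
  if PySem.Str.pyGet? product (st.1.getD product 0) = some char then
    let i := st.1.getD product 0 + 1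
    let d1 := st.1.insert product i
    if i = (PySem.Str.len product : Int) then
      (d1.insert product 0, st.2 + pd.getD product 0)
    else (d1, st.2)
  else st

def getPrice (line : String) (prices : List (String × Int)) : Int :=
  (line.toList.foldl
    (fun st char =>
      (PySem.Dict.ofList prices).keys.foldl (aInner (PySem.Dict.ofList prices) char) st)
    ((PySem.Dict.ofList prices).keys.foldl
      (fun d product => d.insert product (0 : Int)) PySem.Dict.empty, (0 : Int))).2

-- ===== PORT B =====
-- buckets.setdefault(k, []).append(x)
def bPut (d : PySem.Dict Char (List (String × Int × Int))) (k : Char)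
    (x : String × Int × Int) : PySem.Dict Char (List (String × Int × Int)) :=
  d.modify k [] (· ++ [x])

-- body of B's inner loop: advance one waiting automaton (product, price, i) and re-bucket it
def bAdv (st : PySem.Dict Char (List (String × Int × Int)) × Int)
    (e : String × Int × Int) : PySem.Dict Char (List (String × Int × Int)) × Int :=
  let i0 := e.2.2 + 1
  let ti : Int × Int :=
    if i0 = (PySem.Str.len e.1 : Int) then (st.2 + e.2.1, 0) else (st.2, i0)
  (bPut st.1 ((PySem.Str.pyGet? e.1 ti.2).getD default) (e.1, e.2.1, ti.2), ti.1)

-- body of B's outer loop: 'for ... in buckets.pop(ch, [])'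
def bStep (st : PySem.Dict Char (List (String × Int × Int)) × Int) (ch : Char) :
    PySem.Dict Char (List (String × Int × Int)) × Int :=
  match st.1.pop? ch with
  | some (waiting, d0) => waiting.foldl bAdv (d0, st.2)
  | none => st

def getPrice_alt (line : String) (prices : List (String × Int)) : Int :=
  let init := (PySem.Dict.ofList prices).items.foldl
    (fun d kv => bPut d ((PySem.Str.pyGet? kv.1 0).getD default) (kv.1, kv.2, 0))
    PySem.Dict.empty
  (line.toList.foldl bStep (init, (0 : Int))).2

-- ===== PRECONDITION & SPEC =====
-- Pre_ excludes price dicts containing an empty product name: there A raises IndexError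
-- (product[0]) as soon as the line is nonempty, and B's bucket construction raises the
-- same IndexError even for an empty line (the only excluded inputs where A returns, 0).
def Pre_getPrice (line : String) (prices : List (String × Int)) : Prop :=
  ∀ p ∈ prices, p.1 ≠ ""
instance (line : String) (prices : List (String × Int)) : Decidable (Pre_getPrice line prices) := by unfold Pre_getPrice; infer_instance

def pvWitness_getPrice : String × (List (String × Int)) := ("abab", [("ab", 3), ("ba", 1)])

def Spec_getPrice (line : String) (prices : List (String × Int)) (out : Int) : Prop := out = getPrice_alt line prices
instance (line : String) (prices : List (String × Int)) (out : Int) : Decidable (Spec_getPrice line prices out) := by unfold Spec_getPrice; infer_instance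

-- ===== CLAIM (what is proved, stated in full; the proofs are below) =====
def Claim_equal_getPrice : Prop := ∀ (line : String) (prices : List (String × Int)), Dom_getPrice line prices → Pre_getPrice line prices → Spec_getPrice line prices (getPrice line prices)

-- ===== LEMMAS AND PROOFS =====

-- the single-product greedy automaton, as pure functions on the index
def pstep (p : List Char) (c : Char) (i : Int) : Int :=
  if PySem.List.pyGet? p i = some c then
    (if i + 1 = (p.length : Int) then 0 else i + 1)
  else i

def pbump (p : List Char) (c : Char) (i : Int) : Int :=
  if PySem.List.pyGet? p i = some c then
    (if i + 1 = (p.length : Int) then 1 else 0)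
  else 0

def pcount (p : List Char) (i : Int) : List Char → Int
  | [] => 0
  | c :: cs => pbump p c i + pcount p (pstep p c i) cs

-- ---- A-side lemmas -------------------------------------------------------

theorem aInner_snd (pd : PySem.Dict String Int) (c : Char)
    (st : PySem.Dict String Int × Int) (p : String) :
    (aInner pd c st p).2 = st.2 + pd.getD p 0 * pbump p.toList c (st.1.getD p 0) := by
  unfold aInner pbump
  simp only [PySem.Str.pyGet?_eq, PySem.Chars.pyGet?_eq_listPyGet?, PySem.Str.len_eq]
  split_ifs <;> simp

theorem aInner_fst_getD (pd : PySem.Dict String Int) (c : Char)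
    (st : PySem.Dict String Int × Int) (p q : String) :
    (aInner pd c st p).1.getD q 0 =
      if q = p then pstep p.toList c (st.1.getD p 0) else st.1.getD q 0 := by
  unfold aInner pstep
  simp only [PySem.Str.pyGet?_eq, PySem.Chars.pyGet?_eq_listPyGet?, PySem.Str.len_eq]
  by_cases h1 : PySem.List.pyGet? p.toList (st.1.getD p 0) = some c
  · simp only [if_pos h1]
    by_cases h2 : st.1.getD p 0 + 1 = (p.toList.length : Int)
    · simp only [if_pos h2, PySem.Dict.getD_insert]
      split_ifs <;> rfl
    · simp only [if_neg h2, PySem.Dict.getD_insert]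
  · simp only [if_neg h1]
    split_ifs with h
    · subst h; rfl
    · rfl

theorem innerA_getD (pd : PySem.Dict String Int) (c : Char) :
    ∀ (K : List String), K.Nodup → ∀ (st : PySem.Dict String Int × Int) (k : String),
      (K.foldl (aInner pd c) st).1.getD k 0 =
        if k ∈ K then pstep k.toList c (st.1.getD k 0) else st.1.getD k 0 := by
  intro K
  induction K with
  | nil => intro _ st k; simp
  | cons p K ih =>
    intro hnd st k
    rcases List.nodup_cons.mp hnd with ⟨hp, hnd'⟩
    simp only [List.foldl_cons, ih hnd']
    by_cases hk : k = p
    · subst hk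
      have : k ∉ K := hp
      simp [this, aInner_fst_getD]
    · simp [List.mem_cons, hk, aInner_fst_getD]

theorem innerA_sum (pd : PySem.Dict String Int) (c : Char) :
    ∀ (K : List String), K.Nodup → ∀ (st : PySem.Dict String Int × Int),
      (K.foldl (aInner pd c) st).2 =
        st.2 + (K.map (fun p => pd.getD p 0 * pbump p.toList c (st.1.getD p 0))).sum := by
  intro K
  induction K with
  | nil => intro _ st; simp
  | cons p K ih =>
    intro hnd st
    rcases List.nodup_cons.mp hnd with ⟨hp, hnd'⟩
    simp only [List.foldl_cons, ih hnd', aInner_snd, List.map_cons, List.sum_cons]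
    have hcong : ∀ q ∈ K,
        pd.getD q 0 * pbump q.toList c ((aInner pd c st p).1.getD q 0) =
        pd.getD q 0 * pbump q.toList c (st.1.getD q 0) := by
      intro q hq
      have : q ≠ p := fun h => hp (h ▸ hq)
      rw [aInner_fst_getD, if_neg this]
    rw [List.map_congr_left hcong]
    ring

theorem outerA (pd : PySem.Dict String Int) (K : List String) (hnd : K.Nodup) :
    ∀ (cs : List Char) (st : PySem.Dict String Int × Int),
      (cs.foldl (fun st c => K.foldl (aInner pd c) st) st).2 =
        st.2 + (K.map (fun p => pd.getD p 0 * pcount p.toList (st.1.getD p 0) cs)).sum := by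
  intro cs
  induction cs with
  | nil =>
    intro st
    have : (K.map (fun p => pd.getD p 0 * pcount p.toList (st.1.getD p 0) [])).sum = 0 := by
      simp [pcount]
    simp [this]
  | cons c cs ih =>
    intro st
    simp only [List.foldl_cons, ih, innerA_sum pd c K hnd st]
    have hcong : ∀ p ∈ K,
        pd.getD p 0 * pcount p.toList ((K.foldl (aInner pd c) st).1.getD p 0) cs =
        pd.getD p 0 * pcount p.toList (pstep p.toList c (st.1.getD p 0)) cs := by
      intro p hp
      rw [innerA_getD pd c K hnd st p, if_pos hp]
    rw [List.map_congr_left hcong]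
    have : ∀ p : String,
        pd.getD p 0 * pbump p.toList c (st.1.getD p 0) +
          pd.getD p 0 * pcount p.toList (pstep p.toList c (st.1.getD p 0)) cs =
        pd.getD p 0 * pcount p.toList (st.1.getD p 0) (c :: cs) := by
      intro p; simp [pcount]; ring
    calc st.2 + (K.map fun p => pd.getD p 0 * pbump p.toList c (st.1.getD p 0)).sum +
          (K.map fun p => pd.getD p 0 * pcount p.toList (pstep p.toList c (st.1.getD p 0)) cs).sum
        = st.2 + (K.map fun p =>
            pd.getD p 0 * pbump p.toList c (st.1.getD p 0) +
            pd.getD p 0 * pcount p.toList (pstep p.toList c (st.1.getD p 0)) cs).sum := by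
          rw [PySem.List.sum_map_add_int]; ring
      _ = st.2 + (K.map fun p => pd.getD p 0 * pcount p.toList (st.1.getD p 0) (c :: cs)).sum := by
          rw [List.map_congr_left (fun p _ => this p)]

theorem init_getD_zero :
    ∀ (K : List String) (d : PySem.Dict String Int), (∀ k, d.getD k 0 = 0) →
      ∀ k, (K.foldl (fun d p => d.insert p (0 : Int)) d).getD k 0 = 0 := by
  intro K
  induction K with
  | nil => intro d h k; simpa using h k
  | cons p K ih =>
    intro d h k
    simp only [List.foldl_cons]
    exact ih _ (fun k => by rw [PySem.Dict.getD_insert]; split_ifs <;> simp [h]) k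

-- ---- B-side abstractions -------------------------------------------------

-- value of one waiting automaton on the remaining input
def term (cs : List Char) (e : String × Int × Int) : Int :=
  e.2.1 * pcount e.1.toList e.2.2 cs

def gainE (e : String × Int × Int) : Int :=
  if e.2.2 + 1 = (e.1.toList.length : Int) then e.2.1 else 0

def advE (e : String × Int × Int) : String × Int × Int :=
  (e.1, e.2.1, if e.2.2 + 1 = (e.1.toList.length : Int) then 0 else e.2.2 + 1)

def keyE (e : String × Int × Int) : Char :=
  (PySem.List.pyGet? e.1.toList e.2.2).getD default

def inRangeE (e : String × Int × Int) : Prop :=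
  0 ≤ e.2.2 ∧ e.2.2 < (e.1.toList.length : Int)

def goodE (k : Char) (e : String × Int × Int) : Prop :=
  inRangeE e ∧ PySem.List.pyGet? e.1.toList e.2.2 = some k

def iSum (cs : List Char) (l : List (Char × List (String × Int × Int))) : Int :=
  (l.map (fun kv => ((kv.2.map (term cs)).sum))).sum

def WFd (d : PySem.Dict Char (List (String × Int × Int))) : Prop :=
  d.keys.Nodup ∧ ∀ kv ∈ d.items, ∀ e ∈ kv.2, goodE kv.1 e

theorem keyE_spec (e : String × Int × Int) (h : inRangeE e) :
    PySem.List.pyGet? e.1.toList e.2.2 = some (keyE e) := by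
  obtain ⟨h0, h1⟩ := h
  unfold keyE
  rw [PySem.List.pyGet?_eq_some_getElem _ h0 h1]
  rfl

theorem goodE_keyE (e : String × Int × Int) (h : inRangeE e) : goodE (keyE e) e :=
  ⟨h, keyE_spec e h⟩

theorem inRangeE_advE (e : String × Int × Int) (h : inRangeE e) : inRangeE (advE e) := by
  obtain ⟨h0, h1⟩ := h
  unfold advE inRangeE
  dsimp only
  split_ifs with hc
  · exact ⟨le_refl 0, by omega⟩
  · exact ⟨by omega, by omega⟩

theorem term_match (cs : List Char) (ch : Char) (e : String × Int × Int)
    (h : goodE ch e) : term (ch :: cs) e = gainE e + term cs (advE e) := by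
  obtain ⟨_, hg⟩ := h
  simp only [term, gainE, advE, pcount, pbump, pstep, hg, if_pos]
  split_ifs <;> ring

theorem term_skip (cs : List Char) (ch k : Char) (e : String × Int × Int)
    (h : goodE k e) (hne : k ≠ ch) : term (ch :: cs) e = term cs e := by
  have hns : ¬ (PySem.List.pyGet? e.1.toList e.2.2 = some ch) := by
    rw [h.2]; simpa using hne
  simp only [term, pcount, pbump, pstep, if_neg hns]
  ring

theorem bAdv_eq (st : PySem.Dict Char (List (String × Int × Int)) × Int)
    (e : String × Int × Int) :
    bAdv st e = (bPut st.1 (keyE (advE e)) (advE e), st.2 + gainE e) := by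
  unfold bAdv bPut advE gainE keyE
  simp only [PySem.Str.pyGet?_eq, PySem.Chars.pyGet?_eq_listPyGet?, PySem.Str.len_eq]
  split_ifs with hc
  · rfl
  · simp

-- entries of a list of buckets with all keys different from ch keep their value at ch
theorem iSum_no_ch (cs : List Char) (ch : Char)
    (l : List (Char × List (String × Int × Int)))
    (hg : ∀ kv ∈ l, ∀ e ∈ kv.2, goodE kv.1 e) (hne : ∀ kv ∈ l, kv.1 ≠ ch) :
    iSum (ch :: cs) l = iSum cs l := by
  unfold iSum
  apply congrArg
  apply List.map_congr_left
  intro kv hkv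
  apply congrArg
  apply List.map_congr_left
  intro e he
  exact term_skip cs ch kv.1 e (hg kv hkv e he) (hne kv hkv)

theorem sum_replace (cs : List Char) (k : Char) (v : List (String × Int × Int)) :
    ∀ (l : List (Char × List (String × Int × Int))) (b : List (String × Int × Int)),
      (l.map Prod.fst).Nodup → (k, b) ∈ l →
      iSum cs (l.map (fun p => if (p.1 == k) = true then (k, v) else p)) =
        iSum cs l - (b.map (term cs)).sum + (v.map (term cs)).sum := by
  intro l
  induction l with
  | nil => intro b _ hb; cases hb
  | cons p l ih =>
    intro b hnd hb
    rcases List.nodup_cons.mp hnd with ⟨hp, hnd'⟩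
    by_cases hpk : p.1 = k
    · have hpb : p = (k, b) := by
        rcases List.mem_cons.mp hb with h | h
        · exact h.symm
        · exact absurd (hpk ▸ List.mem_map_of_mem h) hp
      subst hpb
      have htail : l.map (fun p => if (p.1 == k) = true then (k, v) else p) = l := by
        rw [List.map_congr_left (g := id) ?_, List.map_id]
        intro q hq
        have : q.1 ≠ k := by
          intro hqk
          apply hp
          rw [hpk]
          exact List.mem_map.mpr ⟨q, hq, hqk⟩
        simp [this]
      simp only [List.map_cons, htail]
      simp only [iSum, List.map_cons, List.sum_cons]
      simp
      ring
    · have hb' : (k, b) ∈ l := by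
        rcases List.mem_cons.mp hb with h | h
        · exact absurd (congrArg Prod.fst h.symm) hpk
        · exact h
      have : (p.1 == k) = false := by simpa using hpk
      simp only [List.map_cons, this, Bool.false_eq_true, if_false]
      simp only [iSum, List.map_cons, List.sum_cons] at *
      rw [ih b hnd' hb']
      ring

theorem nodup_fst_items (d : PySem.Dict Char (List (String × Int × Int)))
    (hnd : d.keys.Nodup) : (d.items.map Prod.fst).Nodup := hnd

theorem iSum_bPut (cs : List Char) (d : PySem.Dict Char (List (String × Int × Int)))
    (k : Char) (x : String × Int × Int) (hnd : d.keys.Nodup) :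
    iSum cs (bPut d k x).items = iSum cs d.items + term cs x := by
  have hins : bPut d k x = d.insert k (d.getD k [] ++ [x]) := rfl
  rw [hins, PySem.Dict.items_insert]
  by_cases hc : d.contains k = true
  · rw [if_pos hc]
    have hsome : (d.get? k).isSome := by rw [← PySem.Dict.contains_eq_isSome_get?]; exact hc
    obtain ⟨b, hb⟩ := Option.isSome_iff_exists.mp hsome
    have hgd : d.getD k [] = b := PySem.Dict.getD_of_get?_eq_some d [] hb
    have hmem : (k, b) ∈ d.items := PySem.Dict.mem_items_of_get?_eq_some d hb
    rw [sum_replace cs k _ d.items b (nodup_fst_items d hnd) hmem, hgd]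
    simp only [List.map_append, List.sum_append]
    simp [term]
    ring
  · rw [if_neg hc]
    have hgd : d.getD k [] = [] :=
      PySem.Dict.getD_of_not_contains d [] (by simpa using hc)
    rw [hgd]
    simp [iSum, term]

theorem WF_bPut (d : PySem.Dict Char (List (String × Int × Int)))
    (k : Char) (x : String × Int × Int) (hwf : WFd d) (hx : goodE k x) :
    WFd (bPut d k x) := by
  obtain ⟨hnd, hgood⟩ := hwf
  have hins : bPut d k x = d.insert k (d.getD k [] ++ [x]) := rfl
  constructor
  · rw [hins]; exact PySem.Dict.nodup_keys_insert d _ _ hnd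
  · intro kv hkv e he
    rw [hins] at hkv
    rcases (PySem.Dict.mem_items_insert d _ _ kv).mp hkv with h | ⟨h, _⟩
    · subst h
      rcases List.mem_append.mp he with h1 | h1
      · cases hg : d.get? k with
        | none =>
          rw [PySem.Dict.getD_of_get?_eq_none d [] hg] at h1
          cases h1
        | some b =>
          rw [PySem.Dict.getD_of_get?_eq_some d [] hg] at h1
          exact hgood (k, b) (PySem.Dict.mem_items_of_get?_eq_some d hg) e h1
      · rcases List.mem_singleton.mp h1 with rfl
        exact hx
    · exact hgood kv h e he

theorem foldl_bAdv (cs : List Char) :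
    ∀ (w : List (String × Int × Int)) (d : PySem.Dict Char (List (String × Int × Int))) (t : Int),
      WFd d → (∀ e ∈ w, inRangeE e) →
      WFd (w.foldl bAdv (d, t)).1 ∧
      (w.foldl bAdv (d, t)).2 + iSum cs (w.foldl bAdv (d, t)).1.items =
        t + iSum cs d.items + (w.map (fun e => gainE e + term cs (advE e))).sum := by
  intro w
  induction w with
  | nil => intro d t hwf _; exact ⟨hwf, by simp⟩
  | cons e w ih =>
    intro d t hwf hr
    have he : inRangeE e := hr e (List.mem_cons_self ..)
    have hadv : goodE (keyE (advE e)) (advE e) := goodE_keyE _ (inRangeE_advE e he)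
    have hwf' : WFd (bPut d (keyE (advE e)) (advE e)) := WF_bPut d _ _ hwf hadv
    have hput := iSum_bPut cs d (keyE (advE e)) (advE e) hwf.1
    have step : (e :: w).foldl bAdv (d, t) =
        w.foldl bAdv (bPut d (keyE (advE e)) (advE e), t + gainE e) := by
      simp only [List.foldl_cons, bAdv_eq]
    obtain ⟨hwf2, heq⟩ := ih (bPut d (keyE (advE e)) (advE e)) (t + gainE e) hwf'
      (fun e' he' => hr e' (List.mem_cons_of_mem _ he'))
    refine ⟨by rw [step]; exact hwf2, ?_⟩
    rw [step, heq, hput]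
    simp only [List.map_cons, List.sum_cons]
    ring

theorem iSum_split (cs : List Char) (ch : Char) :
    ∀ (l : List (Char × List (String × Int × Int))),
      (l.map Prod.fst).Nodup → (∀ kv ∈ l, ∀ e ∈ kv.2, goodE kv.1 e) →
      iSum (ch :: cs) l =
        iSum cs (l.filter (fun kv => !(kv.1 == ch))) +
        (((((l.find? (fun kv => kv.1 == ch)).map Prod.snd).getD []).map
            (fun e => gainE e + term cs (advE e))).sum) := by
  intro l
  induction l with
  | nil => simp [iSum]
  | cons kv l ih =>
    intro hnd hg
    rcases List.nodup_cons.mp hnd with ⟨hp, hnd'⟩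
    by_cases hk : kv.1 = ch
    · have hb : (kv.1 == ch) = true := by simpa using hk
      have hl_ne : ∀ kv' ∈ l, kv'.1 ≠ ch := by
        intro kv' h' hc
        exact hp (by rw [hk, ← hc]; exact List.mem_map_of_mem h')
      have hfil : l.filter (fun kv => !(kv.1 == ch)) = l := by
        apply List.filter_eq_self.mpr
        intro kv' h'
        simpa using hl_ne kv' h'
      have hbucket : kv.2.map (term (ch :: cs)) =
          kv.2.map (fun e => gainE e + term cs (advE e)) := by
        apply List.map_congr_left
        intro e he
        exact term_match cs ch e (hk ▸ hg kv (List.mem_cons_self ..) e he)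
      have h2 := iSum_no_ch cs ch l (fun kv' h' => hg kv' (List.mem_cons_of_mem _ h')) hl_ne
      simp only [List.find?_cons, hb, List.filter_cons, Bool.not_true, Bool.false_eq_true,
        if_false, hfil]
      simp only [iSum, List.map_cons, List.sum_cons, hbucket] at *
      rw [h2]
      simp only [Option.map_some, Option.getD_some]
      ring
    · have hb : (kv.1 == ch) = false := by simpa using hk
      have hbucket : kv.2.map (term (ch :: cs)) = kv.2.map (term cs) := by
        apply List.map_congr_left
        intro e he
        exact term_skip cs ch kv.1 e (hg kv (List.mem_cons_self ..) e he) hk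
      have ih' := ih hnd' (fun kv' h' => hg kv' (List.mem_cons_of_mem _ h'))
      simp only [List.find?_cons, hb, List.filter_cons, Bool.not_false, if_true]
      simp only [iSum, List.map_cons, List.sum_cons, hbucket] at *
      rw [ih']
      ring

theorem bStep_inv (cs : List Char) (ch : Char)
    (d : PySem.Dict Char (List (String × Int × Int))) (t : Int) (hwf : WFd d) :
    WFd (bStep (d, t) ch).1 ∧
    (bStep (d, t) ch).2 + iSum cs (bStep (d, t) ch).1.items = t + iSum (ch :: cs) d.items := by
  obtain ⟨hnd, hgood⟩ := hwf
  cases hg : d.get? ch with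
  | none =>
    have hstep : bStep (d, t) ch = (d, t) := by
      simp [bStep, PySem.Dict.pop?, hg]
    rw [hstep]
    have hne : ∀ kv ∈ d.items, kv.1 ≠ ch := by
      intro kv hkv hc
      exact (PySem.Dict.get?_eq_none_iff_not_mem_keys d ch).mp hg
        (hc ▸ PySem.Dict.mem_keys_of_mem_items d hkv)
    exact ⟨⟨hnd, hgood⟩, by rw [iSum_no_ch cs ch d.items hgood hne]⟩
  | some w =>
    have hstep : bStep (d, t) ch = w.foldl bAdv (d.erase ch, t) := by
      simp [bStep, PySem.Dict.pop?, hg]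
    have hwmem : (ch, w) ∈ d.items := PySem.Dict.mem_items_of_get?_eq_some d hg
    have hwr : ∀ e ∈ w, inRangeE e := fun e he => (hgood (ch, w) hwmem e he).1
    have herase_items : (d.erase ch).items = d.items.filter (fun kv => !(kv.1 == ch)) := rfl
    have hnd' : (d.erase ch).keys.Nodup := by
      have : ((d.items.filter (fun kv => !(kv.1 == ch))).map Prod.fst).Sublist
          (d.items.map Prod.fst) := List.Sublist.map Prod.fst List.filter_sublist
      exact List.Nodup.sublist this (nodup_fst_items d hnd)
    have hwf' : WFd (d.erase ch) := by
      refine ⟨hnd', ?_⟩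
      intro kv hkv e he
      rw [herase_items] at hkv
      exact hgood kv (List.mem_of_mem_filter hkv) e he
    obtain ⟨hwf2, heq⟩ := foldl_bAdv cs w (d.erase ch) t hwf' hwr
    refine ⟨by rw [hstep]; exact hwf2, ?_⟩
    rw [hstep, heq]
    have hfind : ((d.items.find? (fun kv => kv.1 == ch)).map Prod.snd).getD [] = w := by
      have : (d.items.find? (fun p => p.1 == ch)).map (fun x => x.2) = some w := hg
      cases hf : d.items.find? (fun p => p.1 == ch) with
      | none => rw [hf] at this; cases this
      | some kv => rw [hf] at this; simp at this; simp [this]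
    rw [iSum_split cs ch d.items (nodup_fst_items d hnd) hgood, hfind, herase_items]
    ring

theorem iSum_nil (l : List (Char × List (String × Int × Int))) : iSum [] l = 0 := by
  unfold iSum
  rw [List.map_congr_left (g := fun _ => (0 : Int)) ?_]
  · simp
  · intro kv _
    rw [List.map_congr_left (g := fun _ => (0 : Int)) ?_]
    · simp
    · intro e _
      simp [term, pcount]

theorem foldl_bStep (cs : List Char) :
    ∀ (d : PySem.Dict Char (List (String × Int × Int))) (t : Int), WFd d →
      (cs.foldl bStep (d, t)).2 = t + iSum cs d.items := by
  induction cs with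
  | nil => intro d t _; simp [iSum_nil]
  | cons c cs ih =>
    intro d t hwf
    obtain ⟨hwf', heq⟩ := bStep_inv cs c d t hwf
    have hpair : bStep (d, t) c = ((bStep (d, t) c).1, (bStep (d, t) c).2) := rfl
    calc ((c :: cs).foldl bStep (d, t)).2
        = (cs.foldl bStep ((bStep (d, t) c).1, (bStep (d, t) c).2)).2 := by
          rw [List.foldl_cons, ← hpair]
      _ = (bStep (d, t) c).2 + iSum cs (bStep (d, t) c).1.items :=
          ih (bStep (d, t) c).1 (bStep (d, t) c).2 hwf'
      _ = t + iSum (c :: cs) d.items := heq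

theorem init_fold (cs : List Char) :
    ∀ (l : List (String × Int)) (d : PySem.Dict Char (List (String × Int × Int))),
      WFd d → (∀ kv ∈ l, inRangeE (kv.1, kv.2, (0 : Int))) →
      WFd (l.foldl (fun d kv => bPut d ((PySem.Str.pyGet? kv.1 0).getD default) (kv.1, kv.2, 0)) d) ∧
      iSum cs (l.foldl (fun d kv => bPut d ((PySem.Str.pyGet? kv.1 0).getD default) (kv.1, kv.2, 0)) d).items =
        iSum cs d.items + (l.map (fun kv => term cs (kv.1, kv.2, (0 : Int)))).sum := by
  intro l
  induction l with
  | nil => intro d hwf _; exact ⟨hwf, by simp⟩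
  | cons kv l ih =>
    intro d hwf hr
    have he : inRangeE (kv.1, kv.2, (0 : Int)) := hr kv (List.mem_cons_self ..)
    have hkey : ((PySem.Str.pyGet? kv.1 0).getD default) = keyE (kv.1, kv.2, (0 : Int)) := by
      simp only [keyE, PySem.Str.pyGet?_eq, PySem.Chars.pyGet?_eq_listPyGet?]
    have hwf' : WFd (bPut d ((PySem.Str.pyGet? kv.1 0).getD default) (kv.1, kv.2, 0)) := by
      rw [hkey]; exact WF_bPut d _ _ hwf (goodE_keyE _ he)
    have hput : iSum cs (bPut d ((PySem.Str.pyGet? kv.1 0).getD default)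
        (kv.1, kv.2, 0)).items = iSum cs d.items + term cs (kv.1, kv.2, 0) :=
      iSum_bPut cs d _ _ hwf.1
    obtain ⟨hwf2, heq⟩ := ih _ hwf' (fun kv' h' => hr kv' (List.mem_cons_of_mem _ h'))
    refine ⟨hwf2, ?_⟩
    rw [List.foldl_cons] at *
    rw [heq, hput]
    simp only [List.map_cons, List.sum_cons]
    ring

theorem mem_fst_update (κ ν : Type) [BEq κ] [LawfulBEq κ] :
    ∀ (l : List (κ × ν)) (d : PySem.Dict κ ν) (k : κ),
      k ∈ (d.update l).keys → k ∈ d.keys ∨ k ∈ l.map Prod.fst := by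
  intro l
  induction l with
  | nil => intro d k h; exact Or.inl h
  | cons p l ih =>
    intro d k h
    rcases ih (d.insert p.1 p.2) k h with h1 | h1
    · rcases (PySem.Dict.mem_keys_insert d p.1 k p.2).mp h1 with h2 | h2
      · exact Or.inr (by simp [h2])
      · exact Or.inl h2
    · exact Or.inr (List.mem_cons_of_mem _ h1)

theorem mem_fst_ofList {κ ν : Type} [BEq κ] [LawfulBEq κ] (l : List (κ × ν)) :
    ∀ k ∈ (PySem.Dict.ofList l).keys, k ∈ l.map Prod.fst := by
  intro k hk
  rcases mem_fst_update κ ν l PySem.Dict.empty k hk with h | h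
  · simp [PySem.Dict.empty, PySem.Dict.keys] at h
  · exact h

theorem empty_items :
    (PySem.Dict.empty : PySem.Dict Char (List (String × Int × Int))).items = [] := rfl

theorem WF_empty : WFd PySem.Dict.empty := by
  refine ⟨PySem.Dict.nodup_keys_empty, ?_⟩
  intro kv hkv e he
  rw [empty_items] at hkv
  cases hkv

-- ===== VERDICT (by name: the statement is the Claim_ definition above) =====
theorem getPrice_spec : Claim_equal_getPrice := by
  intro line prices _ hpre
  unfold Spec_getPrice
  have hnd : (PySem.Dict.ofList prices : PySem.Dict String Int).keys.Nodup :=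
    PySem.Dict.nodup_keys_ofList prices
  have hidx : ∀ k : String,
      ((PySem.Dict.ofList prices : PySem.Dict String Int).keys.foldl
        (fun d product => d.insert product (0 : Int)) PySem.Dict.empty).getD k 0 = 0 :=
    init_getD_zero _ PySem.Dict.empty (by simp)
  have hA : getPrice line prices =
      ((PySem.Dict.ofList prices : PySem.Dict String Int).keys.map
        (fun p => (PySem.Dict.ofList prices : PySem.Dict String Int).getD p 0 *
          pcount p.toList 0 line.toList)).sum := by
    unfold getPrice
    rw [outerA _ _ hnd]
    simp only [zero_add]
    exact congrArg _ (List.map_congr_left (fun p _ => by rw [hidx p]))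
  have hw : ∀ kv ∈ (PySem.Dict.ofList prices : PySem.Dict String Int).items,
      inRangeE (kv.1, kv.2, (0 : Int)) := by
    intro kv hkv
    have hk : kv.1 ∈ prices.map Prod.fst :=
      mem_fst_ofList prices kv.1 (PySem.Dict.mem_keys_of_mem_items _ hkv)
    obtain ⟨p, hp, hfst⟩ := List.mem_map.mp hk
    have hne : kv.1 ≠ "" := hfst ▸ hpre p hp
    have hnil : kv.1.toList ≠ [] := by
      intro h
      exact hne (String.toList_inj.mp (by simpa using h))
    have hlen : 0 < kv.1.toList.length := List.length_pos_iff.mpr hnil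
    refine ⟨le_refl 0, ?_⟩
    show (0 : Int) < (kv.1.toList.length : Int)
    exact_mod_cast hlen
  obtain ⟨hWFinit, hinit⟩ :=
    init_fold line.toList (PySem.Dict.ofList prices : PySem.Dict String Int).items
      PySem.Dict.empty WF_empty hw
  have hB : getPrice_alt line prices =
      ((PySem.Dict.ofList prices : PySem.Dict String Int).keys.map
        (fun p => (PySem.Dict.ofList prices : PySem.Dict String Int).getD p 0 *
          pcount p.toList 0 line.toList)).sum := by
    unfold getPrice_alt
    rw [foldl_bStep line.toList _ 0 hWFinit, hinit]
    rw [empty_items]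
    have hzero : iSum line.toList ([] : List (Char × List (String × Int × Int))) = 0 := by
      simp [iSum]
    rw [hzero]
    rw [PySem.Dict.items_eq_map_keys _ hnd 0, List.map_map]
    simp only [zero_add, zero_add]
    exact congrArg _ (List.map_congr_left (fun p _ => by simp [term, Function.comp]))
  rw [hA, hB]
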